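-- pv_equiv track=rewrite | github.com/dshap474/numereng | src/numereng/features/agentic_research/planner.py | _path_allowed
-- ===== SOURCE A (Python) =====
-- from typing import Final
--
-- _WILDCARD_SENTINEL: Final[str] = "*"
--
-- _ALLOWED_OVERRIDE_PATHS: Final[tuple[str, ...]] = (
--     "data.feature_set",
--     "data.target_col",
--     "data.scoring_targets",
--     "data.target_horizon",
--     "data.loading.era_chunk_size",
--     "data.loading.include_feature_neutral_metrics",
--     "preprocessing.nan_missing_all_twos",
--     "preprocessing.missing_value",
--     "model.type",
--     "model.device",
--     "model.params.*",
--     "model.x_groups",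
--     "model.data_needed",
--     "model.target_transform.*",
--     "training.engine.profile",
--     "training.engine.window_size_eras",
--     "training.engine.embargo_eras",
--     "training.resources.parallel_folds",
--     "training.resources.max_threads_per_worker",
--     "output.predictions_name",
--     "output.results_name",
-- )
--
-- def _path_allowed(path: tuple[str, ...]) -> bool:
--     for allowed in _ALLOWED_OVERRIDE_PATHS:
--         allowed_tokens = tuple(allowed.split("."))
--         if len(path) != len(allowed_tokens):
--             continue
--         matches = all(
--             token == _WILDCARD_SENTINEL or token == current for token, current in zip(allowed_tokens, path, strict=True)
--         )
--         if matches: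
--             return True
--     return False
-- ===== SOURCE B (Python) =====
-- _WILDCARD_SENTINEL = "*"
--
-- _ALLOWED_OVERRIDE_PATHS = (
--     "data.feature_set",
--     "data.target_col",
--     "data.scoring_targets",
--     "data.target_horizon",
--     "data.loading.era_chunk_size",
--     "data.loading.include_feature_neutral_metrics",
--     "preprocessing.nan_missing_all_twos",
--     "preprocessing.missing_value",
--     "model.type",
--     "model.device",
--     "model.params.*",
--     "model.x_groups",
--     "model.data_needed",
--     "model.target_transform.*",
--     "training.engine.profile",
--     "training.engine.window_size_eras",
--     "training.engine.embargo_eras",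
--     "training.resources.parallel_folds",
--     "training.resources.max_threads_per_worker",
--     "output.predictions_name",
--     "output.results_name",
-- )
--
-- # Precomputed indexes: exact token-tuples, and prefixes of trailing-wildcard patterns.
-- _EXACT = frozenset(
--     tuple(p.split("."))
--     for p in _ALLOWED_OVERRIDE_PATHS
--     if not p.endswith("." + _WILDCARD_SENTINEL)
-- )
-- _WILD_PREFIX = frozenset(
--     tuple(p.split("."))[:-1]
--     for p in _ALLOWED_OVERRIDE_PATHS
--     if p.endswith("." + _WILDCARD_SENTINEL)
-- )
--
-- def _path_allowed(path: tuple[str, ...]) -> bool: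
--     t = tuple(path)
--     return t in _EXACT or (bool(t) and t[:-1] in _WILD_PREFIX)
-- ===== Notes on version B (the rewrite author's own statement) =====
-- stated objective: idiomatic
-- what changed: Replaces the per-call scan that re-tokenizes every pattern and zip-compares token by token with two frozensets built once at module load (exact token-tuples, and prefixes of trailing-wildcard patterns); the call is then two hash membership tests.
import Mathlib
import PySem

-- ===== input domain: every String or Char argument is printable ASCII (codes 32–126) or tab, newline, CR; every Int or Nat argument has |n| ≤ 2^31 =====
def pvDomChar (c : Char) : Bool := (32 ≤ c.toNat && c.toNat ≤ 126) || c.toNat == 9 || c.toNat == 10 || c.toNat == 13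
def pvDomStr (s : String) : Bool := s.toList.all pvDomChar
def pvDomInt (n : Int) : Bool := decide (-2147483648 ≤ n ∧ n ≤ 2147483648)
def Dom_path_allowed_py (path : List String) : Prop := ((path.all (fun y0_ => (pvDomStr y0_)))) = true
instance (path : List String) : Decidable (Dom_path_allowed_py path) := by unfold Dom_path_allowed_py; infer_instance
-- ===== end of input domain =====

-- B replaces A's per-call scan over all patterns (re-tokenizing and zip-comparing each) with
-- two sets precomputed at module load (exact token tuples, trailing-wildcard prefixes) and
-- answers with two membership tests; return value only, no mutation.

-- ===== PORT A =====
def pvAllowedOverridePaths : List String := [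
  "data.feature_set",
  "data.target_col",
  "data.scoring_targets",
  "data.target_horizon",
  "data.loading.era_chunk_size",
  "data.loading.include_feature_neutral_metrics",
  "preprocessing.nan_missing_all_twos",
  "preprocessing.missing_value",
  "model.type",
  "model.device",
  "model.params.*",
  "model.x_groups",
  "model.data_needed",
  "model.target_transform.*",
  "training.engine.profile",
  "training.engine.window_size_eras",
  "training.engine.embargo_eras",
  "training.resources.parallel_folds",
  "training.resources.max_threads_per_worker",
  "output.predictions_name",
  "output.results_name"]

-- allowed.split("."): the separator is the non-empty literal ".", so split? is always some (getD [] unreachable)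
-- the 'for allowed in _ALLOWED_OVERRIDE_PATHS' loop of A, with early 'return True'
def pvALoop (path : List String) : List String → Bool
  | [] => false
  | allowed :: rest =>
      let allowedTokens := (PySem.Str.split? allowed ".").getD []
      if allowedTokens.length ≠ path.length then pvALoop path rest
      else if (allowedTokens.zip path).all (fun tc => tc.1 == "*" || tc.1 == tc.2) then true
      else pvALoop path rest

def path_allowed_py (path : List String) : Bool := pvALoop path pvAllowedOverridePaths

-- ===== PORT B =====
-- module-level frozensets of B: exact token tuples, and prefixes of trailing-wildcard patterns
def pvExactSet : PySem.Set (List String) :=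
  PySem.Set.ofList
    ((pvAllowedOverridePaths.filter (fun p => !(PySem.Str.endswith p ".*"))).map
      (fun p => (PySem.Str.split? p ".").getD []))

def pvWildPrefixSet : PySem.Set (List String) :=
  PySem.Set.ofList
    ((pvAllowedOverridePaths.filter (fun p => PySem.Str.endswith p ".*")).map
      (fun p => ((PySem.Str.split? p ".").getD []).dropLast))

def path_allowed_py_alt (path : List String) : Bool :=
  PySem.Set.contains pvExactSet path ||
    (!path.isEmpty && PySem.Set.contains pvWildPrefixSet path.dropLast)

-- ===== PRECONDITION & SPEC =====
def Spec_path_allowed_py (path : List String) (out : Bool) : Prop := out = path_allowed_py_alt path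
instance (path : List String) (out : Bool) : Decidable (Spec_path_allowed_py path out) := by unfold Spec_path_allowed_py; infer_instance

-- ===== CLAIM (what is proved, stated in full; the proofs are below) =====
def Claim_equal_path_allowed_py : Prop := ∀ (path : List String), Dom_path_allowed_py path → Spec_path_allowed_py path (path_allowed_py path)

-- ===== LEMMAS AND PROOFS =====

-- A's loop with the tokenization hoisted out (proof helper only)
def pvALoopTok (path : List String) : List (List String) → Bool
  | [] => false
  | toks :: rest =>
      if toks.length ≠ path.length then pvALoopTok path rest
      else if (toks.zip path).all (fun tc => tc.1 == "*" || tc.1 == tc.2) then true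
      else pvALoopTok path rest

theorem pvALoop_eq_tok (path : List String) (l : List String) :
    pvALoop path l = pvALoopTok path (l.map (fun p => (PySem.Str.split? p ".").getD [])) := by
  induction l with
  | nil => rfl
  | cons a rest ih => simp [pvALoop, pvALoopTok, ih]

def pvTokLists : List (List String) := [
  ["data","feature_set"], ["data","target_col"], ["data","scoring_targets"], ["data","target_horizon"],
  ["data","loading","era_chunk_size"], ["data","loading","include_feature_neutral_metrics"],
  ["preprocessing","nan_missing_all_twos"], ["preprocessing","missing_value"],
  ["model","type"], ["model","device"], ["model","params","*"], ["model","x_groups"], ["model","data_needed"],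
  ["model","target_transform","*"], ["training","engine","profile"], ["training","engine","window_size_eras"],
  ["training","engine","embargo_eras"], ["training","resources","parallel_folds"],
  ["training","resources","max_threads_per_worker"], ["output","predictions_name"], ["output","results_name"]]

theorem tokensMap :
    pvAllowedOverridePaths.map (fun p => (PySem.Str.split? p ".").getD []) = pvTokLists := by decide

theorem exactSet_lit : pvExactSet = [
  ["data","feature_set"], ["data","target_col"], ["data","scoring_targets"], ["data","target_horizon"],
  ["data","loading","era_chunk_size"], ["data","loading","include_feature_neutral_metrics"],
  ["preprocessing","nan_missing_all_twos"], ["preprocessing","missing_value"],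
  ["model","type"], ["model","device"], ["model","x_groups"], ["model","data_needed"],
  ["training","engine","profile"], ["training","engine","window_size_eras"],
  ["training","engine","embargo_eras"], ["training","resources","parallel_folds"],
  ["training","resources","max_threads_per_worker"], ["output","predictions_name"], ["output","results_name"]] := by decide

theorem wildSet_lit : pvWildPrefixSet = [["model","params"], ["model","target_transform"]] := by decide

theorem not_contains_of_len {l : List (List String)} {x : List String}
    (h : ∀ t ∈ l, t.length ≠ x.length) : l.contains x = false := by
  simp only [List.contains_eq_mem, decide_eq_false_iff_not]
  exact fun hm => h x hm rfl

theorem path_allowed_key (path : List String) :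
    path_allowed_py path = path_allowed_py_alt path := by
  match path with
  | [] => decide
  | [a] =>
    simp only [path_allowed_py, pvALoop_eq_tok, tokensMap, path_allowed_py_alt, exactSet_lit,
      wildSet_lit, PySem.Set.contains]
    simp [pvALoopTok, pvTokLists]
  | [a, b] =>
    simp only [path_allowed_py, pvALoop_eq_tok, tokensMap, path_allowed_py_alt, exactSet_lit,
      wildSet_lit, PySem.Set.contains]
    simp [pvALoopTok, pvTokLists]
    simp [eq_comm]
  | [a, b, c] =>
    simp only [path_allowed_py, pvALoop_eq_tok, tokensMap, path_allowed_py_alt, exactSet_lit,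
      wildSet_lit, PySem.Set.contains]
    simp [pvALoopTok, pvTokLists]
    simp [eq_comm]
    ac_rfl
  | a :: b :: c :: d :: r =>
    simp only [path_allowed_py, pvALoop_eq_tok, tokensMap, path_allowed_py_alt, exactSet_lit,
      wildSet_lit, PySem.Set.contains]
    rw [not_contains_of_len (x := a::b::c::d::r) (by intro t ht; fin_cases ht <;> simp),
        not_contains_of_len (x := (a::b::c::d::r).dropLast) (by intro t ht; fin_cases ht <;> simp)]
    simp [pvALoopTok, pvTokLists]

-- ===== VERDICT (by name: the statement is the Claim_ definition above) =====
theorem path_allowed_py_spec : Claim_equal_path_allowed_py := by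
  intro path _
  exact path_allowed_key path
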